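-- pv_equiv track=rewrite | github.com/neilhwang/pcaob_2026 | Code/18_build_institutional_ownership.py | quarter_end_dates
-- ===== SOURCE A (Python) =====
-- def quarter_end_dates(start_year, start_q, end_year, end_q):
--     """Generate (year, quarter, date_string) from start to end."""
--     qe = {1: "03-31", 2: "06-30", 3: "09-30", 4: "12-31"}
--     results = []
--     y, q = start_year, start_q
--     while (y, q) <= (end_year, end_q):
--         results.append((y, q, f"{y}-{qe[q]}"))
--         q += 1
--         if q > 4:
--             q = 1
--             y += 1
--     return results
-- ===== SOURCE B (Python) =====
-- def quarter_end_dates(start_year, start_q, end_year, end_q):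
--     """Generate (year, quarter, date_string) from start to end."""
--     qe = {1: "03-31", 2: "06-30", 3: "09-30", 4: "12-31"}
--     return [
--         (y, q, f"{y}-{qe[q]}")
--         for y in range(start_year, end_year + 1)
--         for q in (1, 2, 3, 4)
--         if (start_year, start_q) <= (y, q) <= (end_year, end_q)
--     ]
-- ===== Notes on version B (the rewrite author's own statement) =====
-- stated objective: simpler
-- what changed: Replaces the while-loop with a manually carried year/quarter counter by a nested comprehension over the years in range and the four fixed quarters, filtered by the lexicographic bounds; Pre_ excludes only the inputs where A raises KeyError (loop entered with an invalid start quarter).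
import Mathlib
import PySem

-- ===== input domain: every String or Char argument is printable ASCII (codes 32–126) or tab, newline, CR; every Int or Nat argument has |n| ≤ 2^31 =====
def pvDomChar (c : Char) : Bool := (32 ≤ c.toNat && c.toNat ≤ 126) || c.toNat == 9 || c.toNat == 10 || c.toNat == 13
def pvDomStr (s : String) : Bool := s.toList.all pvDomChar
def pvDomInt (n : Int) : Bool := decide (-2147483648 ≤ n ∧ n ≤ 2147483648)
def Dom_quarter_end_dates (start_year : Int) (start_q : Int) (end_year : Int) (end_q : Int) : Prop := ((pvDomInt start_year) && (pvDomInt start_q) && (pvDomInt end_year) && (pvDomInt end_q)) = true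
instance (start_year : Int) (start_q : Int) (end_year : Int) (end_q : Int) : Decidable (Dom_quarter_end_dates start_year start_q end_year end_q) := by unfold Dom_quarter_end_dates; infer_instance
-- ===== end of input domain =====

-- B replaces A's single while-loop with manual quarter carry by a nested per-year comprehension (years × fixed quarters, filtered by the lexicographic bounds): simpler, same cost.


-- ===== PORT A =====
-- qe = {1: "03-31", 2: "06-30", 3: "09-30", 4: "12-31"}
def pvQe : PySem.Dict Int String :=
  PySem.Dict.ofList [(1, "03-31"), (2, "06-30"), (3, "09-30"), (4, "12-31")]

-- upper bound on the number of while-iterations left from state (y, q): a totality device only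
def pvSteps (end_year y q : Int) : Nat := ((end_year + 1 - y) * 5 + (5 - min q 5)).toNat

-- the while-loop, step for step; the Nat counter only makes the recursion structural (it never alters a step);
-- qe[q] is ported as getD with "" (the KeyError inputs are excluded by Pre_, where the lookup is exact)
def pvLoopA (end_year : Int) (end_q : Int) (n : Nat) (y : Int) (q : Int) : List (Int × Int × String) :=
  match n with
  | 0 => []
  | Nat.succ m =>
    if y < end_year ∨ (y = end_year ∧ q ≤ end_q) then
      (y, q, PySem.Int.toStr y ++ "-" ++ PySem.Dict.getD pvQe q "") ::
        (if q + 1 > 4 then pvLoopA end_year end_q m (y + 1) 1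
         else pvLoopA end_year end_q m y (q + 1))
    else []

def quarter_end_dates (start_year : Int) (start_q : Int) (end_year : Int) (end_q : Int) : List (Int × Int × String) :=
  pvLoopA end_year end_q (pvSteps end_year start_year start_q) start_year start_q

-- ===== PORT B =====
-- Source B: a nested comprehension over the years of range(start_year, end_year+1) and the four fixed quarters,
-- keeping the pairs between the start and end bounds
-- the chained tuple comparison is the lexicographic condition written out; qe[q] is exact here since q ∈ {1,2,3,4}
def quarter_end_dates_alt (start_year : Int) (start_q : Int) (end_year : Int) (end_q : Int) : List (Int × Int × String) :=
  (PySem.List.pyRange start_year (end_year + 1) 1).flatMap (fun y =>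
    ([1, 2, 3, 4] : List Int).filterMap (fun q =>
      if (start_year < y ∨ (start_year = y ∧ start_q ≤ q)) ∧ (y < end_year ∨ (y = end_year ∧ q ≤ end_q)) then
        some (y, q, PySem.Int.toStr y ++ "-" ++ PySem.Dict.getD pvQe q "")
      else none))

-- ===== PRECONDITION & SPEC =====
-- Pre_ excludes exactly the inputs on which A raises KeyError: the while-loop is entered
-- ((start_year, start_q) ≤ (end_year, end_q) lexicographically) with start_q not a key of qe (outside 1..4).
def Pre_quarter_end_dates (start_year : Int) (start_q : Int) (end_year : Int) (end_q : Int) : Prop :=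
  (1 ≤ start_q ∧ start_q ≤ 4) ∨ ¬ (start_year < end_year ∨ (start_year = end_year ∧ start_q ≤ end_q))
instance (start_year : Int) (start_q : Int) (end_year : Int) (end_q : Int) : Decidable (Pre_quarter_end_dates start_year start_q end_year end_q) := by unfold Pre_quarter_end_dates; infer_instance

def pvWitness_quarter_end_dates : Int × Int × Int × Int := (2020, 1, 2021, 2)

def Spec_quarter_end_dates (start_year : Int) (start_q : Int) (end_year : Int) (end_q : Int) (out : List (Int × Int × String)) : Prop := out = quarter_end_dates_alt start_year start_q end_year end_q
instance (start_year : Int) (start_q : Int) (end_year : Int) (end_q : Int) (out : List (Int × Int × String)) : Decidable (Spec_quarter_end_dates start_year start_q end_year end_q out) := by unfold Spec_quarter_end_dates; infer_instance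

-- ===== CLAIM =====
def Claim_equal_quarter_end_dates : Prop := ∀ (start_year : Int) (start_q : Int) (end_year : Int) (end_q : Int), Dom_quarter_end_dates start_year start_q end_year end_q → Pre_quarter_end_dates start_year start_q end_year end_q → Spec_quarter_end_dates start_year start_q end_year end_q (quarter_end_dates start_year start_q end_year end_q)

-- ===== LEMMAS AND PROOFS =====

-- the item appended for (y, q)
def pvItem (y q : Int) : Int × Int × String :=
  (y, q, PySem.Int.toStr y ++ "-" ++ PySem.Dict.getD pvQe q "")

-- quarters of year y from quarter q on, up to the end bound (proof helper, recursion on q)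
def pvChunk (ey eq y q : Int) : List (Int × Int × String) :=
  if 4 < q then []
  else (if y < ey ∨ (y = ey ∧ q ≤ eq) then [pvItem y q] else []) ++ pvChunk ey eq y (q + 1)
termination_by (5 - q).toNat
decreasing_by omega

-- the inner comprehension of B for year y
def pvInner (sy sq ey eq y : Int) : List (Int × Int × String) :=
  ([1, 2, 3, 4] : List Int).filterMap (fun q =>
    if (sy < y ∨ (sy = y ∧ sq ≤ q)) ∧ (y < ey ∨ (y = ey ∧ q ≤ eq)) then
      some (pvItem y q)
    else none)

lemma pvAlt_eq (sy sq ey eq : Int) :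
    quarter_end_dates_alt sy sq ey eq = (PySem.List.pyRange sy (ey + 1) 1).flatMap (pvInner sy sq ey eq) := rfl

lemma pvChunk_stop (ey eq y q : Int) (h : 4 < q) : pvChunk ey eq y q = [] := by
  rw [pvChunk, if_pos h]

lemma pvChunk_cons (ey eq y q : Int) (h : y < ey ∨ (y = ey ∧ q ≤ eq)) (h4 : q ≤ 4) :
    pvChunk ey eq y q = pvItem y q :: pvChunk ey eq y (q + 1) := by
  rw [pvChunk, if_neg (by omega), if_pos h]
  rfl

lemma pvChunk_nil (ey eq y q : Int) (h : ¬ (y < ey ∨ (y = ey ∧ q ≤ eq))) : pvChunk ey eq y q = [] := by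
  rw [pvChunk]
  by_cases h1 : 4 < q
  · rw [if_pos h1]
  · rw [if_neg h1, if_neg h, List.nil_append, pvChunk_nil ey eq y (q + 1) (by omega)]
termination_by (5 - q).toNat
decreasing_by omega

lemma pvInner_of_lt (sy sq ey eq y : Int) (hy : sy < y) :
    pvInner sy sq ey eq y = pvChunk ey eq y 1 := by
  rw [pvInner, pvChunk, pvChunk, pvChunk, pvChunk, pvChunk]
  norm_num
  simp only [List.filterMap_cons, List.filterMap_nil, hy, true_or, true_and]
  split_ifs <;> rfl

lemma pvInner_start (sy sq ey eq : Int) (h1 : 1 ≤ sq) (h4 : sq ≤ 4) :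
    pvInner sy sq ey eq sy = pvChunk ey eq sy sq := by
  interval_cases sq <;>
    · rw [pvInner, pvChunk, pvChunk, pvChunk, pvChunk, pvChunk]
      norm_num
      simp only [List.filterMap_cons, List.filterMap_nil]
      split_ifs <;> first | rfl | omega

-- when the loop condition fails, the loop body never runs, whatever the counter
lemma pvLoopA_nil (ey eq : Int) (n : Nat) (y q : Int) (h : ¬ (y < ey ∨ (y = ey ∧ q ≤ eq))) :
    pvLoopA ey eq n y q = [] := by
  cases n with
  | zero => rfl
  | succ m => rw [pvLoopA, if_neg h]

-- the loop condition forces a positive step bound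
lemma pvSteps_pos (ey : Int) (eq y q : Int) (h : y < ey ∨ (y = ey ∧ q ≤ eq)) :
    1 ≤ pvSteps ey y q := by
  simp only [pvSteps]
  omega

-- any sufficient counter computes the same list (counter irrelevance)
lemma pvLoopA_congr (ey eq : Int) : ∀ (n m : Nat) (y q : Int),
    pvSteps ey y q ≤ n → pvSteps ey y q ≤ m → pvLoopA ey eq n y q = pvLoopA ey eq m y q := by
  intro n
  induction n with
  | zero =>
    intro m y q hn _
    by_cases hc : y < ey ∨ (y = ey ∧ q ≤ eq)
    · exact absurd hn (by have := pvSteps_pos ey eq y q hc; omega)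
    · rw [pvLoopA_nil ey eq 0 y q hc, pvLoopA_nil ey eq m y q hc]
  | succ n ih =>
    intro m y q hn hm
    by_cases hc : y < ey ∨ (y = ey ∧ q ≤ eq)
    · cases m with
      | zero => exact absurd hm (by have := pvSteps_pos ey eq y q hc; omega)
      | succ m' =>
        rw [pvLoopA, pvLoopA, if_pos hc, if_pos hc]
        by_cases hb : q + 1 > 4
        · rw [if_pos hb, if_pos hb,
              ih m' (y + 1) 1 (by simp only [pvSteps] at *; omega) (by simp only [pvSteps] at *; omega)]
        · rw [if_neg hb, if_neg hb,
              ih m' y (q + 1) (by simp only [pvSteps] at *; omega) (by simp only [pvSteps] at *; omega)]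
    · rw [pvLoopA_nil ey eq (n + 1) y q hc, pvLoopA_nil ey eq m y q hc]

-- one year of the loop at a time
lemma pvLoopA_year (ey eq : Int) : ∀ (n : Nat) (y q : Int), 1 ≤ q → q ≤ 4 → pvSteps ey y q ≤ n →
    pvLoopA ey eq n y q = pvChunk ey eq y q ++ pvLoopA ey eq (pvSteps ey (y + 1) 1) (y + 1) 1 := by
  intro n
  induction n with
  | zero =>
    intro y q h1 h4 hn
    have hc : ¬ (y < ey ∨ (y = ey ∧ q ≤ eq)) := by
      intro hc
      exact absurd hn (by have := pvSteps_pos ey eq y q hc; omega)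
    rw [pvLoopA_nil ey eq 0 y q hc, pvChunk_nil ey eq y q hc,
        pvLoopA_nil ey eq _ (y + 1) 1 (by omega), List.nil_append]
  | succ n ih =>
    intro y q h1 h4 hn
    by_cases hc : y < ey ∨ (y = ey ∧ q ≤ eq)
    · rw [pvLoopA, if_pos hc]
      by_cases hb : q + 1 > 4
      · have hq4 : q = 4 := by omega
        subst hq4
        rw [if_pos hb, pvChunk_cons ey eq y 4 hc (by norm_num),
            pvChunk_stop ey eq y (4 + 1) (by norm_num),
            pvLoopA_congr ey eq n (pvSteps ey (y + 1) 1) (y + 1) 1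
              (by simp only [pvSteps] at *; omega) (le_refl _)]
        rfl
      · rw [if_neg hb, ih y (q + 1) (by omega) (by omega) (by simp only [pvSteps] at *; omega),
            pvChunk_cons ey eq y q hc (by omega)]
        rfl
    · rw [pvLoopA_nil ey eq (n + 1) y q hc, pvChunk_nil ey eq y q hc,
          pvLoopA_nil ey eq _ (y + 1) 1 (by omega), List.nil_append]

-- from any later year: the loop is B's comprehension over the remaining years
lemma pvLoopA_tail (sy sq ey eq : Int) : ∀ (n : Nat) (y : Int), sy < y → pvSteps ey y 1 ≤ n →
    pvLoopA ey eq (pvSteps ey y 1) y 1 = (PySem.List.pyRange y (ey + 1) 1).flatMap (pvInner sy sq ey eq) := by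
  intro n
  induction n with
  | zero =>
    intro y hy hn
    have hye : ey < y := by simp only [pvSteps] at hn; omega
    rw [pvLoopA_nil ey eq _ y 1 (by omega), PySem.List.pyRange_one_eq_nil (by omega), List.flatMap_nil]
  | succ n ih =>
    intro y hy hn
    by_cases hle : y ≤ ey
    · rw [PySem.List.pyRange_one_cons (by omega), List.flatMap_cons,
          pvInner_of_lt sy sq ey eq y hy,
          pvLoopA_year ey eq (pvSteps ey y 1) y 1 (by norm_num) (by norm_num) (le_refl _),
          ih (y + 1) (by omega) (by simp only [pvSteps] at *; omega)]
    · rw [pvLoopA_nil ey eq _ y 1 (by omega), PySem.List.pyRange_one_eq_nil (by omega), List.flatMap_nil]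

-- ===== VERDICT =====
theorem quarter_end_dates_spec : Claim_equal_quarter_end_dates := by
  intro sy sq ey eq _ hpre
  unfold Spec_quarter_end_dates quarter_end_dates
  rw [pvAlt_eq]
  by_cases hcond : sy < ey ∨ (sy = ey ∧ sq ≤ eq)
  · have hq : 1 ≤ sq ∧ sq ≤ 4 := by
      rcases hpre with h | h
      · exact h
      · exact absurd hcond h
    rw [PySem.List.pyRange_one_cons (by omega), List.flatMap_cons,
        pvInner_start sy sq ey eq hq.1 hq.2,
        pvLoopA_year ey eq (pvSteps ey sy sq) sy sq hq.1 hq.2 (le_refl _),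
        pvLoopA_tail sy sq ey eq (pvSteps ey (sy + 1) 1) (sy + 1) (by omega) (le_refl _)]
  · rw [pvLoopA_nil ey eq _ sy sq hcond]
    by_cases hle : sy ≤ ey
    · have hsy : sy = ey ∧ eq < sq := by omega
      rw [PySem.List.pyRange_one_cons (by omega), PySem.List.pyRange_one_eq_nil (by omega),
          List.flatMap_cons, List.flatMap_nil, List.append_nil, eq_comm, pvInner,
          List.filterMap_eq_nil_iff]
      intro q' _
      rw [if_neg (by omega)]
    · rw [PySem.List.pyRange_one_eq_nil (by omega), List.flatMap_nil]
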